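-- pv_equiv track=rewrite | github.com/eeeeeeeelias/nlp-rake | src/nlp_rake/rake.py | split_tokens_to_phrases
-- ===== SOURCE A (Python) =====
-- import string
-- from typing import Dict, List, Set, Tuple
--
-- PUNCTUATION = string.punctuation.replace('\'', '')  # Do not use apostrophe as a delimiter
--
-- ENGLISH_WORDS_STOPLIST: List[str] = [
--     '(', ')', 'and', 'of', 'the', 'amongst', 'with', 'from', 'after', 'its', 'it', 'at', 'is',
--     'this', ',', '.', 'be', 'in', 'that', 'an', 'other', 'than', 'also', 'are', 'may', 'suggests',
--     'all', 'where', 'most', 'against', 'more', 'have', 'been', 'several', 'as', 'before',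
--     'although', 'yet', 'likely', 'rather', 'over', 'a', 'for', 'can', 'these', 'considered',
--     'used', 'types', 'given', 'precedes',
-- ]
--
-- def split_tokens_to_phrases(tokens: List[str], stoplist: List[str] = None) -> List[str]:
--     """
--     Merge tokens into phrases, delimited by items from stoplist.
--
--     Phrase is a sequence of token that has the following properties:
--     - phrase contains 1 or more tokens
--     - tokens from phrase go in a row
--     - phrase does not contain delimiters from stoplist
--     - either the previous (not in a phrase) token belongs to stop list or it is the beginning of tokens list
--     - either the next (not in a phrase) token belongs to stop list or it is the end of tokens list
--
--     Example:
--     split_tokens_to_phrases(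
--         tokens=["Mary", "and", "John", ",", "some", "words", "(", "and", "other", "words", ")"],
--         stoplist=["and", ",", ".", "(", ")"]) ->
--     -> ["Mary", "John", "some words", "other words"]
--     """
--     if stoplist is None:
--         stoplist = ENGLISH_WORDS_STOPLIST
--     stoplist += list(PUNCTUATION)
--
--     current_phrase: List[str] = []
--     all_phrases: List[str] = []
--     stoplist_set: Set[str] = {stopword.lower() for stopword in stoplist}
--     for token in tokens:
--         if token.lower() in stoplist_set:
--             if current_phrase:
--                 all_phrases.append(" ".join(current_phrase))
--             current_phrase = []
--         else:
--             current_phrase.append(token)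
--     if current_phrase:
--         all_phrases.append(" ".join(current_phrase))
--     return all_phrases
-- ===== SOURCE B (Python) =====
-- import string
-- from itertools import groupby
--
-- PUNCTUATION = string.punctuation.replace('\'', '')
--
-- ENGLISH_WORDS_STOPLIST = [
--     '(', ')', 'and', 'of', 'the', 'amongst', 'with', 'from', 'after', 'its', 'it', 'at', 'is',
--     'this', ',', '.', 'be', 'in', 'that', 'an', 'other', 'than', 'also', 'are', 'may', 'suggests',
--     'all', 'where', 'most', 'against', 'more', 'have', 'been', 'several', 'as', 'before',
--     'although', 'yet', 'likely', 'rather', 'over', 'a', 'for', 'can', 'these', 'considered',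
--     'used', 'types', 'given', 'precedes',
-- ]
--
-- def split_tokens_to_phrases(tokens, stoplist=None):
--     if stoplist is None:
--         stoplist = ENGLISH_WORDS_STOPLIST
--     stoplist += list(PUNCTUATION)  # same in-place mutation of the argument as the original
--     stoplist_set = {stopword.lower() for stopword in stoplist}
--     return [
--         " ".join(group)
--         for is_stop, group in groupby(tokens, key=lambda t: t.lower() in stoplist_set)
--         if not is_stop
--     ]
-- ===== Notes on version B (the rewrite author's own statement) =====
-- stated objective: idiomatic
-- what changed: Replaces the flush-on-delimiter accumulator loop (manual current_phrase/all_phrases state) with itertools.groupby keyed on stopword membership, emitting ' '.join for each non-stopword run in a comprehension.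
import Mathlib
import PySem

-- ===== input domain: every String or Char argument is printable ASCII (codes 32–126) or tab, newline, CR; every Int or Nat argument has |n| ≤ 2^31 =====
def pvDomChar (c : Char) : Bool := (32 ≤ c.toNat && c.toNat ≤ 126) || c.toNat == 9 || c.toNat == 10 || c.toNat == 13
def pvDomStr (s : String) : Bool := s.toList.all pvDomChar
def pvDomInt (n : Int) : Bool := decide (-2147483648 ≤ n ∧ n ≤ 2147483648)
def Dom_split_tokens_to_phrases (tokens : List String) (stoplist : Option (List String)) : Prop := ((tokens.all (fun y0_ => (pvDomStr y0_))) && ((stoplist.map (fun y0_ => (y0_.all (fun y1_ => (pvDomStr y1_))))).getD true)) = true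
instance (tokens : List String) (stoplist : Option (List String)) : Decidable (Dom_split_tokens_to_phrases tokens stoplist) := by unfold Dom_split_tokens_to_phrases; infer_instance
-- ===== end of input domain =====

-- B replaces A's flush-on-delimiter accumulator loop with a groupby over the stopword key and joins
-- the non-stopword runs (idiomatic). Both Pythons mutate `stoplist` (`+=`) identically; the theorems
-- here are about the return value only.

-- ===== PORT A =====
-- string.punctuation with the apostrophe removed, as a list of 1-char strings (list(PUNCTUATION))
def pvPunctuation : List String :=
  ["!", "\"", "#", "$", "%", "&", "(", ")", "*", "+", ",", "-", ".", "/", ":", ";",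
   "<", "=", ">", "?", "@", "[", "\\", "]", "^", "_", "`", "{", "|", "}", "~"]

def pvEnglishStoplist : List String :=
  ["(", ")", "and", "of", "the", "amongst", "with", "from", "after", "its", "it", "at", "is",
   "this", ",", ".", "be", "in", "that", "an", "other", "than", "also", "are", "may", "suggests",
   "all", "where", "most", "against", "more", "have", "been", "several", "as", "before",
   "although", "yet", "likely", "rather", "over", "a", "for", "can", "these", "considered",
   "used", "types", "given", "precedes"]

def split_tokens_to_phrases (tokens : List String) (stoplist : Option (List String)) : List String :=
  let stoplist := (stoplist.getD pvEnglishStoplist) ++ pvPunctuation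
  let stoplistSet : PySem.Set String := PySem.Set.ofList (stoplist.map PySem.Str.lower)
  let st := tokens.foldl
    (fun (s : List String × List String) token =>
      if PySem.Set.contains stoplistSet (PySem.Str.lower token) then
        if s.1 ≠ [] then ([], s.2 ++ [PySem.Str.join " " s.1]) else ([], s.2)
      else
        (s.1 ++ [token], s.2))
    ([], [])
  if st.1 ≠ [] then st.2 ++ [PySem.Str.join " " st.1] else st.2

-- ===== PORT B =====
-- itertools.groupby(tokens, key): maximal runs of equal key, front to back
def pvGroupBy (key : String → Bool) : List String → List (Bool × List String)
  | [] => []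
  | x :: xs =>
    match pvGroupBy key xs with
    | (k, g) :: rest =>
        if key x = k then (k, x :: g) :: rest else (key x, [x]) :: (k, g) :: rest
    | [] => [(key x, [x])]

def split_tokens_to_phrases_alt (tokens : List String) (stoplist : Option (List String)) : List String :=
  let stoplist := (stoplist.getD pvEnglishStoplist) ++ pvPunctuation
  let stoplistSet : PySem.Set String := PySem.Set.ofList (stoplist.map PySem.Str.lower)
  (pvGroupBy (fun t => PySem.Set.contains stoplistSet (PySem.Str.lower t)) tokens).filterMap
    (fun g => if g.1 then none else some (PySem.Str.join " " g.2))

-- ===== PRECONDITION & SPEC =====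
def Spec_split_tokens_to_phrases (tokens : List String) (stoplist : Option (List String)) (out : List String) : Prop := out = split_tokens_to_phrases_alt tokens stoplist
instance (tokens : List String) (stoplist : Option (List String)) (out : List String) : Decidable (Spec_split_tokens_to_phrases tokens stoplist out) := by unfold Spec_split_tokens_to_phrases; infer_instance

-- ===== CLAIM (what is proved, stated in full; the proofs are below) =====
def Claim_equal_split_tokens_to_phrases : Prop := ∀ (tokens : List String) (stoplist : Option (List String)), Dom_split_tokens_to_phrases tokens stoplist → Spec_split_tokens_to_phrases tokens stoplist (split_tokens_to_phrases tokens stoplist)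

-- ===== LEMMAS AND PROOFS =====

-- B's emission of the groups
def pvEmit (gs : List (Bool × List String)) : List String :=
  gs.filterMap (fun g => if g.1 then none else some (PySem.Str.join " " g.2))

-- A's loop step and flush, abstracted over the stopword predicate
def pvStep (p : String → Bool) (s : List String × List String) (token : String) : List String × List String :=
  if p token then
    if s.1 ≠ [] then ([], s.2 ++ [PySem.Str.join " " s.1]) else ([], s.2)
  else (s.1 ++ [token], s.2)

def pvFinish (s : List String × List String) : List String :=
  if s.1 ≠ [] then s.2 ++ [PySem.Str.join " " s.1] else s.2

-- prepending a stopword token does not change what is emitted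
theorem pvEmit_groupBy_stop (p : String → Bool) (x : String) (xs : List String) (hx : p x = true) :
    pvEmit (pvGroupBy p (x :: xs)) = pvEmit (pvGroupBy p xs) := by
  simp only [pvGroupBy]
  cases h : pvGroupBy p xs with
  | nil => simp [pvEmit, hx]
  | cons g rest =>
    obtain ⟨k, grp⟩ := g
    cases k <;> simp [hx, pvEmit]

-- the core invariant: A's loop state vs B's groups, simultaneously for empty and nonempty current phrase
theorem pvLoop_eq (p : String → Bool) (xs : List String) : ∀ (all : List String) (cur : List String),
    (pvFinish (xs.foldl (pvStep p) ([], all)) = all ++ pvEmit (pvGroupBy p xs)) ∧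
    (cur ≠ [] → pvFinish (xs.foldl (pvStep p) (cur, all)) =
      (match pvGroupBy p xs with
       | (false, g) :: rest => all ++ PySem.Str.join " " (cur ++ g) :: pvEmit rest
       | gs => all ++ PySem.Str.join " " cur :: pvEmit gs)) := by
  induction xs with
  | nil =>
    intro all cur
    constructor
    · simp [pvFinish, pvEmit, pvGroupBy]
    · intro hc; simp [pvFinish, pvEmit, pvGroupBy, hc]
  | cons x xs ih =>
    intro all cur
    constructor
    · by_cases hx : p x = true
      · have h1 := (ih all []).1
        simp only [List.foldl_cons, pvStep, hx, if_pos, ne_eq, not_true_eq_false]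
        simp only [pvEmit_groupBy_stop p x xs hx]
        simpa using h1
      · have hx' : p x = false := by simpa using hx
        have h2 := (ih all [x]).2 (by simp)
        simp only [List.foldl_cons, pvStep, hx', Bool.false_eq_true, if_false]
        simp only [List.nil_append] at h2 ⊢
        rw [h2]
        simp only [pvGroupBy]
        cases h : pvGroupBy p xs with
        | nil => simp [hx', pvEmit]
        | cons g rest =>
          obtain ⟨k, grp⟩ := g
          cases k with
          | false => simp [hx', pvEmit]
          | true => simp [hx', pvEmit]
    · intro hc
      by_cases hx : p x = true
      · have h1 := (ih (all ++ [PySem.Str.join " " cur]) []).1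
        simp only [List.foldl_cons, pvStep, hx, if_pos, ne_eq, hc, not_false_eq_true, if_pos]
        rw [h1, ← pvEmit_groupBy_stop p x xs hx]
        simp only [pvGroupBy]
        cases h : pvGroupBy p xs with
        | nil => simp [hx, pvEmit]
        | cons g rest =>
          obtain ⟨k, grp⟩ := g
          cases k with
          | false => simp [hx, pvEmit]
          | true => simp [hx, pvEmit]
      · have hx' : p x = false := by simpa using hx
        have h2 := (ih all (cur ++ [x])).2 (by simp)
        simp only [List.foldl_cons, pvStep, hx', Bool.false_eq_true, if_false]
        rw [h2]
        simp only [pvGroupBy]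
        cases h : pvGroupBy p xs with
        | nil => simp [hx', pvEmit]
        | cons g rest =>
          obtain ⟨k, grp⟩ := g
          cases k with
          | false => simp [hx', pvEmit]
          | true => simp [hx', pvEmit]

-- ===== VERDICT (by name: the statement is the Claim_ definition above) =====
theorem split_tokens_to_phrases_spec : Claim_equal_split_tokens_to_phrases := by
  intro tokens stoplist _
  show split_tokens_to_phrases tokens stoplist = split_tokens_to_phrases_alt tokens stoplist
  unfold split_tokens_to_phrases split_tokens_to_phrases_alt
  have h := (pvLoop_eq (fun t =>
    PySem.Set.contains (PySem.Set.ofList (((stoplist.getD pvEnglishStoplist) ++ pvPunctuation).map PySem.Str.lower)) (PySem.Str.lower t)) tokens [] []).1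
  simp only [pvFinish, pvEmit, List.nil_append] at h
  exact h
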